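-- pv_equiv track=rewrite | github.com/Caellian/EXP_Tesseract_Scan | obrada.py | keep_caps
-- ===== SOURCE A (Python) =====
-- import string
--
-- UPPER = set([c for c in string.ascii_uppercase])
--
-- def keep_caps(word):
--     if word[0] in UPPER:
--         other_upper = True # all caps
--         other_lower = True # first word in sentence?
--         for c in word[1:]:
--             if c in UPPER:
--                 other_lower = False
--             else:
--                 other_upper = False
--         return other_upper or other_lower
-- ===== SOURCE B (Python) =====
-- import string
--
-- UPPER = set([c for c in string.ascii_uppercase])
--
-- def keep_caps(word):
--     if word[0] in UPPER:
--         k = sum(c in UPPER for c in word)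
--         return k == len(word) or k == 1
-- ===== Notes on version B (the rewrite author's own statement) =====
-- stated objective: alternative
-- what changed: Replaces A's two-boolean-flag loop over the tail with a single arithmetic count of uppercase letters over the whole word: the word is kept iff that count equals the length (all caps) or equals 1 (only the first letter capitalized).
import Mathlib
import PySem

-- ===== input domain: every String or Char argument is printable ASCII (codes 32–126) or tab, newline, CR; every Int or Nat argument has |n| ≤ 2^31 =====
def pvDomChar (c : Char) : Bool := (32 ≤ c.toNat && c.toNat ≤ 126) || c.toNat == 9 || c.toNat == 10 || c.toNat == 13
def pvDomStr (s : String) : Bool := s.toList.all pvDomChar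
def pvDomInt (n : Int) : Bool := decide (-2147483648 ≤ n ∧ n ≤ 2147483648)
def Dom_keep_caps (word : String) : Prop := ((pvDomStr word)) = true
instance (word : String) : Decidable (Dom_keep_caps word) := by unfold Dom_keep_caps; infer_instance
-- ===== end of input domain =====

-- B replaces A's two-boolean-flag loop over the tail by one arithmetic count of uppercase
-- letters over the whole word (keep iff count = length or count = 1); same cost, different decomposition.


-- UPPER = set(string.ascii_uppercase), shared module constant of both Pythons
def pvUpper : PySem.Set Char := PySem.Set.ofList "ABCDEFGHIJKLMNOPQRSTUVWXYZ".toList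

-- ===== PORT A =====
-- A on the character list: guard word[0] in UPPER, then the two-flag loop over word[1:]
def kcA (cs : List Char) : Option Bool :=
  match PySem.Chars.pyGet? cs 0 with
  | none => none                        -- word[0] raises IndexError (excluded by Pre_)
  | some c0 =>
    if pvUpper.contains c0 then
      let st := (PySem.Chars.slice cs (some 1) none).foldl
        (fun (p : Bool × Bool) c => if pvUpper.contains c then (p.1, false) else (false, p.2))
        (true, true)
      some (st.1 || st.2)
    else none                           -- Python's implicit 'return None'

def keep_caps (word : String) : Option Bool := kcA word.toList

-- ===== PORT B =====
-- B on the character list: same guard, then k = sum(c in UPPER for c in word);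
-- return k == len(word) or k == 1
def kcB (cs : List Char) : Option Bool :=
  match PySem.Chars.pyGet? cs 0 with
  | none => none
  | some c0 =>
    if pvUpper.contains c0 then
      let k : Nat := cs.countP (fun c => pvUpper.contains c)
      some ((k == cs.length) || (k == 1))
    else none

def keep_caps_alt (word : String) : Option Bool := kcB word.toList

-- ===== PRECONDITION & SPEC =====
-- Pre_ excludes only the empty string, on which word[0] raises IndexError in both Pythons.
def Pre_keep_caps (word : String) : Prop := word.toList ≠ []
instance (word : String) : Decidable (Pre_keep_caps word) := by unfold Pre_keep_caps; infer_instance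
def pvWitness_keep_caps : String := "Abc"

def Spec_keep_caps (word : String) (out : Option Bool) : Prop := out = keep_caps_alt word
instance (word : String) (out : Option Bool) : Decidable (Spec_keep_caps word out) := by unfold Spec_keep_caps; infer_instance

-- ===== CLAIM (what is proved, stated in full; the proofs are below) =====
def Claim_equal_keep_caps : Prop := ∀ (word : String), Dom_keep_caps word → Pre_keep_caps word → Spec_keep_caps word (keep_caps word)

-- ===== LEMMAS AND PROOFS =====

-- A's two-flag loop computes (a && all-upper, b && all-non-upper)
theorem kc_fold (l : List Char) (a b : Bool) :
    l.foldl (fun (p : Bool × Bool) c => if c ∈ pvUpper then (p.1, false) else (false, p.2)) (a, b)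
      = (a && l.all (fun c => decide (c ∈ pvUpper)), b && l.all (fun c => !decide (c ∈ pvUpper))) := by
  induction l generalizing a b with
  | nil => simp
  | cons c l ih =>
    simp only [List.foldl_cons, List.all_cons]
    by_cases h : c ∈ pvUpper <;> simp [h, ih]

theorem kc_eq (cs : List Char) (h : cs ≠ []) : kcA cs = kcB cs := by
  obtain ⟨c, l, rfl⟩ := List.exists_cons_of_ne_nil h
  have hg : PySem.Chars.pyGet? (c :: l) 0 = some c := by simp
  have hs : PySem.Chars.slice (c :: l) (some 1) none = l := by
    simpa using PySem.List.slice_from_one (c :: l)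
  simp only [kcA, kcB, hg, hs]
  by_cases hc : c ∈ pvUpper
  · have h1 : (l.countP (fun x => decide (x ∈ pvUpper)) == l.length)
        = l.all (fun x => decide (x ∈ pvUpper)) := by
      apply Bool.coe_iff_coe.mp
      rw [beq_iff_eq, List.all_eq_true, List.countP_eq_length]
    have h2 : (l.countP (fun x => decide (x ∈ pvUpper)) == 0)
        = l.all (fun x => !decide (x ∈ pvUpper)) := by
      apply Bool.coe_iff_coe.mp
      rw [beq_iff_eq, List.all_eq_true, List.countP_eq_zero]
      simp
    simp [hc, kc_fold, h1, h2]
  · simp [hc]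

-- ===== VERDICT (by name: the statement is the Claim_ definition above) =====
theorem keep_caps_spec : Claim_equal_keep_caps := by
  intro word _ hpre
  unfold Spec_keep_caps keep_caps keep_caps_alt
  exact kc_eq word.toList hpre
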